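-- pv_equiv track=rewrite | github.com/piotrgradzinski/python_20230422 | functions_pgg/ex_4.py | more_than
-- ===== SOURCE A (Python) =====
-- def more_than(text: str, occurrences: int) -> set:
--     """
--     Returns a set of characters that appear in text more than certain number of times.
--     :param text:
--     :param occurrences: At least how many times a character should appear in the text to be returned in the set.
--     :return:
--     """
--     text = text.lower()
--     characters_count = dict()  # or {} - this expression creates an empty dictionary
--     results = set()
--
--     for character in text:
--         if character not in characters_count:
--             characters_count[character] = 0
--         characters_count[character] += 1
--
--     for character, character_occurrences in characters_count.items():
--         if character_occurrences > occurrences: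
--             results.add(character)
--
--     return results
-- ===== SOURCE B (Python) =====
-- def more_than(text, occurrences):
--     def go(chars):
--         if not chars:
--             return []
--         c = chars[0]
--         rest = [x for x in chars[1:] if x != c]
--         count = len(chars) - len(rest)
--         tail = go(rest)
--         return [c] + tail if count > occurrences else tail
--     return set(go(list(text.lower())))
-- ===== Notes on version B (the rewrite author's own statement) =====
-- stated objective: alternative
-- what changed: Replaced A's two staged passes (dict-count accumulation, then a filtering loop over the dict items) with a quickselect-style recursive partition: take the first remaining character, strip all its occurrences in one partition (the count is the length difference), recurse on the shrunken remainder, and cons the character onto the result when its count exceeds the threshold.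
import Mathlib
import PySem

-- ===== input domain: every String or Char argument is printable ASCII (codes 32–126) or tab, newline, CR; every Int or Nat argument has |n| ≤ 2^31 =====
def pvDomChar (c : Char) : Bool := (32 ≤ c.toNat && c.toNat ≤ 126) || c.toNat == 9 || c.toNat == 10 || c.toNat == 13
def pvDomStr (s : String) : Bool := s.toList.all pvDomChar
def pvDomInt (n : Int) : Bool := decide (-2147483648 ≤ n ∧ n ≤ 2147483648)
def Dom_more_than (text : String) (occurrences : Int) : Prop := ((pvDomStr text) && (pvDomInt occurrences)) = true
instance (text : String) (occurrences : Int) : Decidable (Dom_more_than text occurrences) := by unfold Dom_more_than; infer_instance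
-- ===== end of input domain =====

-- B replaces A's two staged passes (dict-count, then filter over the items) with a recursive
-- partition: strip all occurrences of the first remaining character, count = length difference,
-- recurse on the remainder. Alternative decomposition, not claimed faster.

-- ===== PORT A =====
def more_than (text : String) (occurrences : Int) : List String :=
  let t := (PySem.Str.lower text).toList
  let characters_count : PySem.Dict Char Int :=
    t.foldl (fun d character =>
      (if d.contains character then d else d.insert character 0).modify character 0 (· + 1))
      PySem.Dict.empty
  characters_count.items.foldl
    (fun results p =>
      if p.2 > occurrences then PySem.Set.add results (String.ofList [p.1]) else results)
    PySem.Set.empty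

-- ===== PORT B =====
def mtGo (occurrences : Int) : List Char → List String
  | [] => []
  | c :: rest0 =>
    let rest := rest0.filter (fun x => x != c)
    let count : Int := ((rest0.length + 1 : Nat) : Int) - (rest.length : Int)
    let tail := mtGo occurrences rest
    if count > occurrences then String.ofList [c] :: tail else tail
termination_by l => l.length
decreasing_by simpa using Nat.lt_succ_of_le (List.length_filter_le _ _)

def more_than_alt (text : String) (occurrences : Int) : List String :=
  PySem.Set.ofList (mtGo occurrences (PySem.Str.lower text).toList)

-- ===== PRECONDITION & SPEC =====
def Spec_more_than (text : String) (occurrences : Int) (out : List String) : Prop := out = more_than_alt text occurrences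
instance (text : String) (occurrences : Int) (out : List String) : Decidable (Spec_more_than text occurrences out) := by unfold Spec_more_than; infer_instance

-- ===== CLAIM (what is proved, stated in full; the proofs are below) =====
def Claim_equal_more_than : Prop := ∀ (text : String) (occurrences : Int), Dom_more_than text occurrences → Spec_more_than text occurrences (more_than text occurrences)

-- ===== LEMMAS AND PROOFS =====

-- A's dict-building step is Counter's step
theorem step_eq (d : PySem.Dict Char Int) (c : Char) :
    (if d.contains c then d else d.insert c 0).modify c 0 (· + 1) = d.modify c 0 (· + 1) := by
  by_cases h : d.contains c
  · simp [h]
  · have h' : d.contains c = false := by simpa using h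
    simp [h', PySem.Dict.modify, PySem.Dict.insert_insert_self,
      PySem.Dict.getD_of_not_contains, PySem.Dict.getD_insert_self]

theorem counts_eq (t : List Char) :
    t.foldl (fun d character =>
        (if d.contains character then d else d.insert character 0).modify character 0 (· + 1))
      PySem.Dict.empty = PySem.Dict.counter t := by
  have hf : (fun (d : PySem.Dict Char Int) (character : Char) =>
      (if d.contains character then d else d.insert character 0).modify character 0 (· + 1))
      = fun d x => d.modify x 0 (· + 1) := by
    funext d c; exact step_eq d c
  rw [hf, PySem.Dict.counter_eq_foldl]

theorem ofList_one_inj : Function.Injective (fun c : Char => String.ofList [c]) := by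
  intro a b h
  simpa using congrArg String.toList h

-- A's second loop over a nodup key list is filter-then-map
theorem foldA (occurrences : Int) (t : List Char) (ks : List Char) (acc : List String)
    (hnd : ks.Nodup) (hacc : ∀ k ∈ ks, String.ofList [k] ∉ acc) :
    ks.foldl (fun r k => if (t.count k : Int) > occurrences
        then PySem.Set.add r (String.ofList [k]) else r) acc
      = acc ++ (ks.filter (fun k => decide ((t.count k : Int) > occurrences))).map
          (fun k => String.ofList [k]) := by
  induction ks generalizing acc with
  | nil => simp
  | cons k ks ih =>
    simp only [List.foldl_cons]
    by_cases h : (t.count k : Int) > occurrences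
    · rw [if_pos h, PySem.Set.add_of_not_mem (hacc k (by simp))]
      rw [ih _ hnd.of_cons ?_]
      · simp [h]
      · intro k' hk'
        simp only [List.mem_append, List.mem_singleton]
        rintro (h1 | h2)
        · exact hacc k' (by simp [hk']) h1
        · exact (List.nodup_cons.mp hnd).1 (ofList_one_inj h2 ▸ hk')
    · rw [if_neg h, ih _ hnd.of_cons (fun k' hk' => hacc k' (by simp [hk']))]
      simp [h]

-- ofList commutes with filter
theorem ofList_filter {α : Type} [DecidableEq α] (p : α → Bool) (l : List α) :
    PySem.Set.ofList (l.filter p) = (PySem.Set.ofList l).filter p := by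
  induction l with
  | nil => rfl
  | cons x xs ih =>
    by_cases h : p x
    · simp only [List.filter_cons, h, if_pos, PySem.Set.ofList_cons, ih, PySem.Set.discard,
        List.filter_filter]
      congr 1
      exact List.filter_congr fun a _ => Bool.and_comm _ _
    · simp only [List.filter_cons, h, if_neg, Bool.false_eq_true, not_false_iff,
        PySem.Set.ofList_cons, ih, PySem.Set.discard, List.filter_filter]
      refine List.filter_congr fun a _ => ?_
      by_cases hax : a = x <;> simp [hax, h]

theorem len_filter_ne (rest0 : List Char) (c : Char) :
    (rest0.filter (fun x => x != c)).length + rest0.count c = rest0.length := by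
  induction rest0 with
  | nil => rfl
  | cons y ys ih =>
    by_cases h : y = c
    · subst h; simp [← ih]; omega
    · simp [h, ← ih]; omega

-- B's recursion is filter-then-map over the distinct characters
theorem mtGo_eq_aux (occurrences : Int) (n : Nat) : ∀ (l : List Char), l.length ≤ n →
    mtGo occurrences l
      = ((PySem.Set.ofList l).filter (fun c => decide ((l.count c : Int) > occurrences))).map
          (fun c => String.ofList [c]) := by
  induction n with
  | zero =>
    intro l hl
    rw [List.length_eq_zero_iff.mp (Nat.le_zero.mp hl)]
    simp [mtGo]
  | succ n ih =>
    intro l hl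
    match l with
    | [] => simp [mtGo]
    | c :: rest0 =>
      rw [mtGo]
      have hlen : (rest0.filter (fun x => x != c)).length ≤ n := by
        have := List.length_filter_le (fun x => x != c) rest0
        simp at hl; omega
      rw [ih _ hlen]
      have hcount : ((rest0.length + 1 : Nat) : Int)
          - ((rest0.filter (fun x => x != c)).length : Int) = ((c :: rest0).count c : Int) := by
        have := len_filter_ne rest0 c
        simp only [List.count_cons_self]
        push_cast [← this]
        ring
      have hrest : PySem.Set.ofList (rest0.filter (fun x => x != c))
          = PySem.Set.discard (PySem.Set.ofList rest0) c := by
        rw [ofList_filter]; rfl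
      have htail : ((PySem.Set.ofList (rest0.filter (fun x => x != c))).filter
            (fun y => decide (((rest0.filter (fun x => x != c)).count y : Int) > occurrences))).map
            (fun y => String.ofList [y])
          = ((PySem.Set.discard (PySem.Set.ofList rest0) c).filter
            (fun y => decide (((c :: rest0).count y : Int) > occurrences))).map
            (fun y => String.ofList [y]) := by
        rw [hrest]
        congr 1
        apply List.filter_congr
        intro y hy
        have hyne : y ≠ c := ((PySem.Set.mem_discard _ _ _).mp hy).2
        have hcy : (rest0.filter (fun x => x != c)).count y = (c :: rest0).count y := by
          simp [List.count_filter, hyne, Ne.symm hyne]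
        rw [hcy]
      rw [hcount, htail, PySem.Set.ofList_cons, List.filter_cons]
      split_ifs with h1 h2 h2 <;> simp_all; omega

theorem mtGo_eq (occurrences : Int) (l : List Char) :
    mtGo occurrences l
      = ((PySem.Set.ofList l).filter (fun c => decide ((l.count c : Int) > occurrences))).map
          (fun c => String.ofList [c]) :=
  mtGo_eq_aux occurrences l.length l le_rfl

-- ===== VERDICT (by name: the statement is the Claim_ definition above) =====
theorem more_than_spec : Claim_equal_more_than := by
  intro text occurrences _
  simp only [Spec_more_than, more_than, more_than_alt]
  rw [counts_eq, PySem.Dict.items_counter, List.foldl_map, mtGo_eq,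
    PySem.Set.ofList_eq_self_of_nodup _
      (List.Nodup.map ofList_one_inj ((PySem.Set.nodup_ofList _).filter _))]
  rw [foldA occurrences _ _ _ (PySem.Set.nodup_ofList _) (by simp [PySem.Set.empty])]
  simp [PySem.Set.empty]
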